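-- pv_equiv track=rewrite | github.com/dvrk-dvys/CoT-GEN | data/gen/gen_training_data.py | generate_aspect_mask
-- ===== SOURCE A (Python) =====
-- def generate_aspect_mask(sentence_tokens, aspect_tokenized):
--     mask = [0] * len(sentence_tokens)
--     aspect_len = len(aspect_tokenized)
--     for i in range(len(sentence_tokens) - aspect_len + 1):
--         if sentence_tokens[i:i + aspect_len] == aspect_tokenized:
--             for j in range(i, i + aspect_len):
--                 mask[j] = 1
--     return mask
-- ===== SOURCE B (Python) =====
-- def generate_aspect_mask(sentence_tokens, aspect_tokenized):
--     # One forward pass: when a match starts at j, a countdown of len(aspect)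
--     # positions is (re)armed; a position is 1 exactly while the countdown runs.
--     n = len(sentence_tokens)
--     m = len(aspect_tokenized)
--     mask = []
--     rem = 0
--     for j in range(n):
--         if j + m <= n and sentence_tokens[j:j + m] == aspect_tokenized:
--             rem = m
--         mask.append(1 if rem > 0 else 0)
--         if rem > 0:
--             rem -= 1
--     return mask
-- ===== Notes on version B (the rewrite author's own statement) =====
-- stated objective: alternative
-- what changed: A marks each whole matched window by rewriting mask positions in a nested loop; B streams once over positions with a single countdown counter that is re-armed at each match start, appending each bit exactly once and never revisiting or overwriting a position.
import Mathlib
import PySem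

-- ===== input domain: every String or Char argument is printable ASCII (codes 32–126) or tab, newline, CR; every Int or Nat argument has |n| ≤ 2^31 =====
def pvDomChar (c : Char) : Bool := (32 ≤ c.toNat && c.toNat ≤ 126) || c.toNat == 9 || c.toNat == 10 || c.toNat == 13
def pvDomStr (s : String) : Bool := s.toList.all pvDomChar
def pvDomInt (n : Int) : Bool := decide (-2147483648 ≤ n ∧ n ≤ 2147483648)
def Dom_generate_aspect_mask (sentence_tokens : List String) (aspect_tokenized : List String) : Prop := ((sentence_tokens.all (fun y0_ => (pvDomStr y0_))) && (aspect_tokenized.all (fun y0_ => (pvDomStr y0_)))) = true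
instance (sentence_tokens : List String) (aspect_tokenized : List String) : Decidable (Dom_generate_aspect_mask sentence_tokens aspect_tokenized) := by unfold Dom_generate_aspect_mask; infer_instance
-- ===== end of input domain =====

-- B replaces A's window-rewriting nested loops by a single append-only pass with a countdown counter re-armed at each match start (alternative decomposition, same asymptotic cost).


-- ===== PORT A =====
def generate_aspect_mask (sentence_tokens : List String) (aspect_tokenized : List String) : List Int :=
  let mask := List.replicate sentence_tokens.length (0 : Int)
  let aspect_len : Int := aspect_tokenized.length
  (PySem.List.pyRange 0 ((sentence_tokens.length : Int) - aspect_len + 1) 1).foldl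
    (fun mask i =>
      if PySem.List.slice sentence_tokens (some i) (some (i + aspect_len)) = aspect_tokenized then
        (PySem.List.pyRange i (i + aspect_len) 1).foldl
          (fun mask j => PySem.List.pySetD mask j 1) mask
      else mask)
    mask

-- ===== PORT B =====
def generate_aspect_mask_alt (sentence_tokens : List String) (aspect_tokenized : List String) : List Int :=
  let n : Int := sentence_tokens.length
  let m : Int := aspect_tokenized.length
  ((PySem.List.pyRange 0 n 1).foldl
    (fun st j =>
      let rem := if j + m ≤ n ∧ PySem.List.slice sentence_tokens (some j) (some (j + m)) = aspect_tokenized then m else st.2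
      (st.1 ++ [if 0 < rem then (1 : Int) else 0], if 0 < rem then rem - 1 else rem))
    (([] : List Int), (0 : Int))).1

-- ===== PRECONDITION & SPEC =====
def Spec_generate_aspect_mask (sentence_tokens : List String) (aspect_tokenized : List String) (out : List Int) : Prop := out = generate_aspect_mask_alt sentence_tokens aspect_tokenized
instance (sentence_tokens : List String) (aspect_tokenized : List String) (out : List Int) : Decidable (Spec_generate_aspect_mask sentence_tokens aspect_tokenized out) := by unfold Spec_generate_aspect_mask; infer_instance

-- ===== CLAIM (what is proved, stated in full; the proofs are below) =====
def Claim_equal_generate_aspect_mask : Prop := ∀ (sentence_tokens : List String) (aspect_tokenized : List String), Dom_generate_aspect_mask sentence_tokens aspect_tokenized → Spec_generate_aspect_mask sentence_tokens aspect_tokenized (generate_aspect_mask sentence_tokens aspect_tokenized)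

-- ===== LEMMAS AND PROOFS =====

-- whether an occurrence of `a` starts at position i of `s`
def pvMatchAt (s a : List String) (i : Nat) : Bool := ((s.drop i).take a.length == a)

-- the common specification: position j is 1 iff some occurrence of `a` covers j
def pvBit (s a : List String) (j : Nat) : Int :=
  if (List.range (j + 1)).any (fun i => pvMatchAt s a i && decide (j < i + a.length)) then 1 else 0

theorem pvMatch_bound {s a : List String} {i : Nat} (h : pvMatchAt s a i = true)
    (hm : 0 < a.length) : i + a.length ≤ s.length := by
  have he : (s.drop i).take a.length = a := by simpa [pvMatchAt] using h
  have := congrArg List.length he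
  simp [List.length_take, List.length_drop] at this
  omega

-- ---- A side, Nat-level ----
def pvAInner (i mcount : Nat) (mask : List Int) : List Int :=
  (List.range' i mcount).foldl (fun mk j => mk.set j 1) mask

theorem pvAInner_length (i mcount : Nat) (mask : List Int) :
    (pvAInner i mcount mask).length = mask.length := by
  induction mcount generalizing i mask with
  | zero => simp [pvAInner]
  | succ mc ih =>
      simp only [pvAInner, List.range'_succ, List.foldl_cons]
      simpa [pvAInner] using (ih (i + 1) (mask.set i 1))

theorem pvAInner_get (mask : List Int) (i mcount j : Nat) (h : i + mcount ≤ mask.length) :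
    (pvAInner i mcount mask)[j]? = if i ≤ j ∧ j < i + mcount then some 1 else mask[j]? := by
  induction mcount generalizing i mask with
  | zero =>
      rw [if_neg (by omega)]
      simp [pvAInner]
  | succ mc ih =>
      simp only [pvAInner, List.range'_succ, List.foldl_cons]
      have h' : i + 1 + mc ≤ (mask.set i 1).length := by simp; omega
      have hih := ih (mask.set i 1) (i + 1) h'
      simp only [pvAInner] at hih
      rw [hih, List.getElem?_set]
      split_ifs <;> first | rfl | omega

def pvALoop (s a : List String) (t : Nat) : List Int :=
  (List.range t).foldl
    (fun mask i => if pvMatchAt s a i then pvAInner i a.length mask else mask)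
    (List.replicate s.length 0)

theorem pvALoop_length (s a : List String) (t : Nat) : (pvALoop s a t).length = s.length := by
  induction t with
  | zero => simp [pvALoop]
  | succ t ih =>
      simp only [pvALoop, List.range_succ, List.foldl_append, List.foldl_cons, List.foldl_nil]
      by_cases h : pvMatchAt s a t = true
      · simp only [h, if_true]
        rw [pvAInner_length]
        simpa [pvALoop] using ih
      · simpa [pvALoop, h] using ih

theorem pvALoop_get (s a : List String) (t j : Nat) :
    (pvALoop s a t)[j]? =
      if (List.range t).any (fun i => pvMatchAt s a i && decide (i ≤ j ∧ j < i + a.length))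
      then some 1 else (List.replicate s.length (0 : Int))[j]? := by
  induction t with
  | zero => simp [pvALoop]
  | succ t ih =>
      have hstep : pvALoop s a (t + 1) =
          if pvMatchAt s a t then pvAInner t a.length (pvALoop s a t) else pvALoop s a t := by
        simp [pvALoop, List.range_succ]
      rw [hstep]
      by_cases h : pvMatchAt s a t = true
      · rw [if_pos h]
        by_cases hm : 0 < a.length
        · have hb : t + a.length ≤ (pvALoop s a t).length := by
            rw [pvALoop_length]; exact pvMatch_bound h hm
          rw [pvAInner_get _ _ _ _ hb, ih]
          simp only [List.range_succ, List.any_append, List.any_cons, List.any_nil, h,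
            Bool.true_and, Bool.or_false]
          by_cases h1 : t ≤ j ∧ j < t + a.length
          · simp [h1]
          · simp [h1]
        · have hz : a.length = 0 := by omega
          have hno : decide (t ≤ j ∧ j < t + a.length) = false := by
            rw [decide_eq_false_iff_not]; omega
          simp only [List.range_succ, List.any_append, List.any_cons, List.any_nil, h,
            hno, Bool.and_false, Bool.or_false]
          have hid : pvAInner t a.length (pvALoop s a t) = pvALoop s a t := by
            rw [hz]; simp [pvAInner]
          rw [hid]
          exact ih
      · have hf : pvMatchAt s a t = false := by simpa using h
        rw [if_neg h, ih]
        simp only [List.range_succ, List.any_append, List.any_cons, List.any_nil, hf,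
          Bool.false_and, Bool.or_false]

theorem pvALoop_eq_map (s a : List String) :
    pvALoop s a (((s.length : Int) - a.length + 1).toNat) = (List.range s.length).map (pvBit s a) := by
  apply List.ext_getElem?
  intro j
  rw [pvALoop_get]
  by_cases hj : j < s.length
  · have hiff :
        ((List.range (((s.length : Int) - a.length + 1).toNat)).any
          (fun i => pvMatchAt s a i && decide (i ≤ j ∧ j < i + a.length)))
        = ((List.range (j + 1)).any (fun i => pvMatchAt s a i && decide (j < i + a.length))) := by
      rw [Bool.eq_iff_iff]
      simp only [List.any_eq_true, Bool.and_eq_true, decide_eq_true_eq, List.mem_range]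
      constructor
      · rintro ⟨i, hiT, hm, hle, hlt⟩
        exact ⟨i, by omega, hm, hlt⟩
      · rintro ⟨i, hij, hm, hlt⟩
        have hmp : 0 < a.length := by omega
        have hb := pvMatch_bound hm hmp
        exact ⟨i, by omega, hm, by omega, hlt⟩
    rw [hiff]
    have hmap : ((List.range s.length).map (pvBit s a))[j]? = some (pvBit s a j) := by
      simp [hj]
    rw [hmap]
    by_cases hb : (List.range (j + 1)).any (fun i => pvMatchAt s a i && decide (j < i + a.length)) = true
    · rw [if_pos hb]
      simp [pvBit, hb]
    · have hb' : (List.range (j + 1)).any (fun i => pvMatchAt s a i && decide (j < i + a.length)) = false := by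
        simpa using hb
      rw [hb']
      simp [pvBit, hb', hj]
  · have hfalse :
        ((List.range (((s.length : Int) - a.length + 1).toNat)).any
          (fun i => pvMatchAt s a i && decide (i ≤ j ∧ j < i + a.length))) = false := by
      rw [Bool.eq_false_iff]
      intro hc
      simp only [List.any_eq_true, Bool.and_eq_true, decide_eq_true_eq, List.mem_range] at hc
      obtain ⟨i, hiT, hm, hle, hlt⟩ := hc
      have hmp : 0 < a.length := by omega
      have hb := pvMatch_bound hm hmp
      omega
    rw [hfalse]
    simp [hj]

theorem pvA_eq (s a : List String) :
    generate_aspect_mask s a = pvALoop s a (((s.length : Int) - a.length + 1).toNat) := by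
  simp only [generate_aspect_mask, pvALoop]
  rw [PySem.List.pyRange_one, List.foldl_map]
  simp only [sub_zero]
  apply PySem.List.foldl_congr_mem
  intro mask k hk
  simp only [zero_add]
  have hcond : (PySem.List.slice s (some ((k : Int))) (some ((k : Int) + (a.length : Int))) = a)
      ↔ pvMatchAt s a k = true := by
    rw [PySem.List.slice_natCast_add]
    simp [pvMatchAt]
  have hinner : ∀ mk : List Int,
      (PySem.List.pyRange (k : Int) ((k : Int) + (a.length : Int)) 1).foldl
        (fun mk j => PySem.List.pySetD mk j 1) mk = pvAInner k a.length mk := by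
    intro mk
    rw [PySem.List.pyRange_one, List.foldl_map, pvAInner, List.range'_eq_map_range, List.foldl_map]
    simp only [add_sub_cancel_left, Int.toNat_natCast]
    apply PySem.List.foldl_congr_mem
    intro acc x hx
    rw [show (k : Int) + (x : Int) = ((k + x : Nat) : Int) by push_cast; ring,
      PySem.List.pySetD_natCast]
  by_cases h : pvMatchAt s a k = true
  · rw [if_pos (hcond.mpr h), if_pos h, hinner]
  · rw [if_neg (fun hc => h (hcond.mp hc)), if_neg h]

-- ---- B side, Nat-level ----
def pvBLoop (s a : List String) (t : Nat) : List Int × Int :=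
  (List.range t).foldl
    (fun st j =>
      let rem := if pvMatchAt s a j then (a.length : Int) else st.2
      (st.1 ++ [if 0 < rem then (1 : Int) else 0], if 0 < rem then rem - 1 else rem))
    ([], 0)

def pvMaxA (s a : List String) (t : Nat) : Int :=
  (List.range t).foldl (fun acc i => if pvMatchAt s a i then max acc ((i : Int) + a.length) else acc) 0

theorem pvFold_max_gt (s a : List String) (l : List Nat) (c q : Int) :
    (q < l.foldl (fun acc i => if pvMatchAt s a i then max acc ((i : Int) + a.length) else acc) c)
      ↔ (q < c ∨ ∃ i ∈ l, pvMatchAt s a i = true ∧ q < (i : Int) + a.length) := by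
  induction l generalizing c with
  | nil => simp
  | cons x xs ih =>
      simp only [List.foldl_cons, List.mem_cons]
      rw [ih]
      by_cases h : pvMatchAt s a x = true
      · simp only [h, if_true]
        constructor
        · rintro (hc | ⟨i, hi1, hi2, hi3⟩)
          · rcases max_choice c ((x : Int) + a.length) with he | he <;> rw [he] at hc
            · exact Or.inl hc
            · exact Or.inr ⟨x, Or.inl rfl, h, hc⟩
          · exact Or.inr ⟨i, Or.inr hi1, hi2, hi3⟩
        · rintro (hc | ⟨i, hi1 | hi1, hi2, hi3⟩)
          · exact Or.inl (lt_of_lt_of_le hc (le_max_left _ _))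
          · subst hi1; exact Or.inl (lt_of_lt_of_le hi3 (le_max_right _ _))
          · exact Or.inr ⟨i, hi1, hi2, hi3⟩
      · simp only [h]
        constructor
        · rintro (hc | ⟨i, hi1, hi2, hi3⟩)
          · exact Or.inl hc
          · exact Or.inr ⟨i, Or.inr hi1, hi2, hi3⟩
        · rintro (hc | ⟨i, hi1 | hi1, hi2, hi3⟩)
          · exact Or.inl hc
          · subst hi1; exact absurd hi2 (by simp [h])
          · exact Or.inr ⟨i, hi1, hi2, hi3⟩

theorem pvMaxA_le (s a : List String) (t : Nat) : pvMaxA s a t ≤ (t : Int) + a.length := by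
  by_contra hc
  have hc' := lt_of_not_ge hc
  rw [pvMaxA, pvFold_max_gt] at hc'
  rcases hc' with h0 | ⟨i, hi, _, hgt⟩
  · omega
  · simp only [List.mem_range] at hi
    omega

theorem pvMaxA_succ (s a : List String) (t : Nat) :
    pvMaxA s a (t + 1) =
      if pvMatchAt s a t then max (pvMaxA s a t) ((t : Int) + a.length) else pvMaxA s a t := by
  simp [pvMaxA, List.range_succ]

theorem pvBLoop_inv (s a : List String) (t : Nat) :
    pvBLoop s a t = ((List.range t).map (pvBit s a), max 0 (pvMaxA s a t - t)) := by
  induction t with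
  | zero => simp [pvBLoop, pvMaxA]
  | succ t ih =>
      have hstep : pvBLoop s a (t + 1) =
          (let rem := if pvMatchAt s a t then (a.length : Int) else (pvBLoop s a t).2;
           ((pvBLoop s a t).1 ++ [if 0 < rem then (1 : Int) else 0],
            if 0 < rem then rem - 1 else rem)) := by
        simp [pvBLoop, List.range_succ]
      rw [hstep, ih]
      simp only
      have hrem : (if pvMatchAt s a t then (a.length : Int) else max 0 (pvMaxA s a t - t))
          = max 0 (pvMaxA s a (t + 1) - t) := by
        rw [pvMaxA_succ]
        by_cases h : pvMatchAt s a t = true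
        · have := pvMaxA_le s a t
          simp only [h, if_true]
          omega
        · simp [h]
      have hany : (t : Int) < pvMaxA s a (t + 1) ↔
          (List.range (t + 1)).any (fun i => pvMatchAt s a i && decide (t < i + a.length)) = true := by
        rw [pvMaxA, pvFold_max_gt]
        simp only [List.any_eq_true, Bool.and_eq_true, decide_eq_true_eq]
        constructor
        · rintro (h0 | ⟨i, hi1, hi2, hi3⟩)
          · omega
          · exact ⟨i, hi1, hi2, by omega⟩
        · rintro ⟨i, hi1, hi2, hi3⟩
          exact Or.inr ⟨i, hi1, hi2, by omega⟩
      have hiff : (0 < max 0 (pvMaxA s a (t + 1) - (t : Int))) ↔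
          (List.range (t + 1)).any (fun i => pvMatchAt s a i && decide (t < i + a.length)) = true := by
        rw [← hany]
        omega
      have hbit : (if 0 < max 0 (pvMaxA s a (t + 1) - (t : Int)) then (1 : Int) else 0) = pvBit s a t := by
        rw [pvBit]
        by_cases hh : (List.range (t + 1)).any (fun i => pvMatchAt s a i && decide (t < i + a.length)) = true
        · rw [if_pos (hiff.mpr hh), if_pos hh]
        · rw [if_neg (fun hp => hh (hiff.mp hp)), if_neg hh]
      rw [hrem]
      refine Prod.ext ?_ ?_
      · simp only
        rw [hbit, List.range_succ, List.map_append]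
        simp
      · simp only
        push_cast
        omega

theorem pvB_eq (s a : List String) :
    generate_aspect_mask_alt s a = (pvBLoop s a s.length).1 := by
  simp only [generate_aspect_mask_alt, pvBLoop]
  rw [PySem.List.pyRange_one, List.foldl_map]
  simp only [sub_zero, Int.toNat_natCast]
  congr 1
  apply PySem.List.foldl_congr_mem
  intro st k hk
  simp only [zero_add]
  have hkn : k < s.length := List.mem_range.mp hk
  have hcond : ((k : Int) + (a.length : Int) ≤ (s.length : Int) ∧
      PySem.List.slice s (some ((k : Int))) (some ((k : Int) + (a.length : Int))) = a)
      ↔ pvMatchAt s a k = true := by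
    constructor
    · rintro ⟨_, hsl⟩
      rw [PySem.List.slice_natCast_add] at hsl
      simp [pvMatchAt, hsl]
    · intro h
      refine ⟨?_, ?_⟩
      · by_cases hm : 0 < a.length
        · have := pvMatch_bound h hm
          omega
        · omega
      · rw [PySem.List.slice_natCast_add]
        simpa [pvMatchAt] using h
  by_cases h : pvMatchAt s a k = true
  · simp only [if_pos (hcond.mpr h), if_pos h]
  · simp only [if_neg (fun hc => h (hcond.mp hc)), if_neg h]

-- ===== VERDICT (by name: the statement is the Claim_ definition above) =====
theorem generate_aspect_mask_spec : Claim_equal_generate_aspect_mask := by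
  intro s a _
  unfold Spec_generate_aspect_mask
  rw [pvA_eq, pvALoop_eq_map, pvB_eq, pvBLoop_inv]
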